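-- pv_equiv track=rewrite | github.com/vbronetskyi/OP_python | cms2/isp/test_roman_number.py | is_valid_roman_number
-- ===== SOURCE A (Python) =====
-- def is_valid_roman_number(roman_numeral):
--     """try numeric"""
--     roman_numeral_set = set(roman_numeral)
--     if not all(char in "IVXLCDM" for char in roman_numeral_set):
--         return False
--     if "IIII" in roman_numeral or "XXXX" in roman_numeral or "CCCC" in roman_numeral or "MMMM" in roman_numeral:
--         return False
--     if "VIV" in roman_numeral or "LXL" in roman_numeral or "DCD" in roman_numeral:
--         return False
--     return True
-- ===== SOURCE B (Python) =====
-- def is_valid_roman_number(roman_numeral):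
--     """try numeric"""
--     p3 = p2 = p1 = ''
--     for c in roman_numeral:
--         if c not in 'IVXLCDM':
--             return False
--         if c in 'IXCM' and p3 == p2 == p1 == c:
--             return False
--         if (p2, p1, c) in (('V', 'I', 'V'), ('L', 'X', 'L'), ('D', 'C', 'D')):
--             return False
--         p3, p2, p1 = p2, p1, c
--     return True
-- ===== Notes on version B (the rewrite author's own statement) =====
-- stated objective: alternative
-- what changed: Replaces A's set-membership pass plus seven whole-string substring scans with a single fused left-to-right pass that keeps a sliding window of the last three characters and checks validity, four-in-a-row runs of I/X/C/M, and the VIV/LXL/DCD patterns at each position.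
import Mathlib
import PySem

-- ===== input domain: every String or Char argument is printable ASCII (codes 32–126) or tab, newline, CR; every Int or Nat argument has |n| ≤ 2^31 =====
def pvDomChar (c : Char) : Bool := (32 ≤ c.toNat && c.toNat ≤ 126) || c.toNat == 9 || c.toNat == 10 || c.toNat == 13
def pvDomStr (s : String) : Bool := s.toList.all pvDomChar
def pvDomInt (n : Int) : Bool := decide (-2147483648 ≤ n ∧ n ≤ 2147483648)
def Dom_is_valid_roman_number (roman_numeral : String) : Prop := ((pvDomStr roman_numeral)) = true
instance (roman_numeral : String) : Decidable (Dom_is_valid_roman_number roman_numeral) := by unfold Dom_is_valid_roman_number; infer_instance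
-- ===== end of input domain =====

-- B fuses A's set-membership pass and seven whole-string substring scans into one
-- left-to-right pass keeping a window of the last three characters (objective: alternative).

-- ===== PORT A =====
def is_valid_roman_number (roman_numeral : String) : Bool :=
  -- roman_numeral_set = set(roman_numeral)
  let roman_numeral_set : PySem.Set Char := PySem.Set.ofList roman_numeral.toList
  -- if not all(char in "IVXLCDM" for char in roman_numeral_set): return False
  if ¬ (roman_numeral_set.all (fun char => PySem.Chars.isIn [char] "IVXLCDM".toList)) then false
  -- if "IIII" in roman_numeral or "XXXX" in … : return False
  else if PySem.Str.isIn "IIII" roman_numeral || PySem.Str.isIn "XXXX" roman_numeral ||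
          PySem.Str.isIn "CCCC" roman_numeral || PySem.Str.isIn "MMMM" roman_numeral then false
  -- if "VIV" in roman_numeral or "LXL" in … or "DCD" in … : return False
  else if PySem.Str.isIn "VIV" roman_numeral || PySem.Str.isIn "LXL" roman_numeral ||
          PySem.Str.isIn "DCD" roman_numeral then false
  else true

-- ===== PORT B =====
-- the loop of Source B: p3/p2/p1 are the last three characters seen ('' or a single char,
-- modelled as a List Char of length ≤ 1); processes the remaining characters.
def pvRomanLoop : List Char → List Char → List Char → List Char → Bool
  | [], _, _, _ => true
  | c :: rest, p3, p2, p1 =>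
    if ¬ PySem.Chars.isIn [c] "IVXLCDM".toList then false
    else if PySem.Chars.isIn [c] "IXCM".toList && (p3 = p2 ∧ p2 = p1 ∧ p1 = [c] : Bool) then false
    else if (p2 = ['V'] ∧ p1 = ['I'] ∧ c = 'V' : Bool) ||
            (p2 = ['L'] ∧ p1 = ['X'] ∧ c = 'L' : Bool) ||
            (p2 = ['D'] ∧ p1 = ['C'] ∧ c = 'D' : Bool) then false
    else pvRomanLoop rest p2 p1 [c]

def is_valid_roman_number_alt (roman_numeral : String) : Bool :=
  pvRomanLoop roman_numeral.toList [] [] []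

-- ===== PRECONDITION & SPEC =====
def Spec_is_valid_roman_number (roman_numeral : String) (out : Bool) : Prop := out = is_valid_roman_number_alt roman_numeral
instance (roman_numeral : String) (out : Bool) : Decidable (Spec_is_valid_roman_number roman_numeral out) := by unfold Spec_is_valid_roman_number; infer_instance

-- ===== CLAIM (what is proved, stated in full; the proofs are below) =====
def Claim_equal_is_valid_roman_number : Prop := ∀ (roman_numeral : String), Dom_is_valid_roman_number roman_numeral → Spec_is_valid_roman_number roman_numeral (is_valid_roman_number roman_numeral)

-- ===== LEMMAS AND PROOFS =====

-- the seven forbidden patterns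
def pvPats : List (List Char) :=
  [['I','I','I','I'], ['X','X','X','X'], ['C','C','C','C'], ['M','M','M','M'],
   ['V','I','V'], ['L','X','L'], ['D','C','D']]

-- `pat` occurs in `r.reverse ++ l` ending inside `l` (r = already-processed part, reversed)
def pvEnds (pat l r : List Char) : Prop :=
  ∃ n, 0 < n ∧ n ≤ l.length ∧ pat.reverse <+: ((l.take n).reverse ++ r)

theorem pvEnds_nil (pat r : List Char) : ¬ pvEnds pat [] r := by
  rintro ⟨n, hn, hle, -⟩; simp at hle; omega

theorem pvTakeRev (c : Char) (rest r : List Char) (n : Nat) :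
    ((c :: rest).take (n+1)).reverse ++ r = (rest.take n).reverse ++ (c :: r) := by
  simp

theorem pvEnds_cons (pat : List Char) (c : Char) (rest r : List Char) :
    pvEnds pat (c :: rest) r ↔ pat.reverse <+: (c :: r) ∨ pvEnds pat rest (c :: r) := by
  constructor
  · rintro ⟨n, hn, hle, hp⟩
    rcases n with _ | m
    · omega
    rcases m with _ | m
    · left; simpa using hp
    · right
      refine ⟨m + 1, by omega, by simp at hle ⊢; omega, ?_⟩
      rw [pvTakeRev] at hp; exact hp
  · rintro (hp | ⟨m, hm, hle, hp⟩)
    · exact ⟨1, by omega, by simp, by simpa using hp⟩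
    · refine ⟨m + 1, by omega, by simp; omega, ?_⟩
      rw [pvTakeRev]; exact hp

theorem pvEnds_nil_right (pat l : List Char) (hpat : pat ≠ []) :
    pvEnds pat l [] ↔ pat <:+: l := by
  constructor
  · rintro ⟨n, hn, hle, hp⟩
    simp only [List.append_nil] at hp
    have h1 : pat <:+ l.take n := List.reverse_prefix.mp hp
    exact h1.isInfix.trans (List.take_prefix n l).isInfix
  · intro h
    rcases h with ⟨s, t, hst⟩
    refine ⟨s.length + pat.length, ?_, ?_, ?_⟩
    · have : 0 < pat.length := List.length_pos_of_ne_nil hpat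
      omega
    · subst hst; simp [List.length_append]
    · subst hst
      have : (s ++ pat ++ t).take (s.length + pat.length) = s ++ pat := by
        rw [List.take_append_of_le_length (by simp), List.take_of_length_le (by simp)]
      rw [this]
      simp [List.reverse_append]

theorem pvIsIn_singleton (c : Char) (s : List Char) : PySem.Chars.isIn [c] s = true ↔ c ∈ s := by
  rw [PySem.Chars.isIn_iff_infix]; exact List.singleton_infix_iff c s

theorem pvChecks_iff (c : Char) (r : List Char) :
    ((PySem.Chars.isIn [c] "IXCM".toList &&
        ((r.drop 2).take 1 = (r.drop 1).take 1 ∧ (r.drop 1).take 1 = r.take 1 ∧ r.take 1 = [c] : Bool)) = true ∨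
     (((r.drop 1).take 1 = ['V'] ∧ r.take 1 = ['I'] ∧ c = 'V' : Bool) ||
      ((r.drop 1).take 1 = ['L'] ∧ r.take 1 = ['X'] ∧ c = 'L' : Bool) ||
      ((r.drop 1).take 1 = ['D'] ∧ r.take 1 = ['C'] ∧ c = 'D' : Bool)) = true) ↔
    ∃ pat ∈ pvPats, pat.reverse <+: (c :: r) := by
  have hx : "IXCM".toList = ['I','X','C','M'] := rfl
  rcases r with _ | ⟨a, _ | ⟨b, _ | ⟨d, rest⟩⟩⟩ <;>
    simp [pvPats, hx, pvIsIn_singleton, List.cons_prefix_cons] <;>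
    aesop

theorem pvRomanLoop_spec (l : List Char) : ∀ r : List Char,
    (pvRomanLoop l ((r.drop 2).take 1) ((r.drop 1).take 1) (r.take 1) = true ↔
    (∀ c ∈ l, PySem.Chars.isIn [c] "IVXLCDM".toList = true) ∧
    (∀ pat ∈ pvPats, ¬ pvEnds pat l r)) := by
  induction l with
  | nil =>
    intro r
    simp only [pvRomanLoop, List.not_mem_nil, false_implies, implies_true, true_and]
    constructor
    · intro _ pat _; exact pvEnds_nil pat r
    · intro _; trivial
  | cons c rest ih =>
    intro r
    by_cases h1 : PySem.Chars.isIn [c] "IVXLCDM".toList = true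
    swap
    · rw [show pvRomanLoop (c :: rest) ((r.drop 2).take 1) ((r.drop 1).take 1) (r.take 1) = false
          from by simp only [pvRomanLoop]; rw [if_pos h1]]
      simp only [Bool.false_eq_true, false_iff]
      rintro ⟨hall, -⟩
      exact h1 (hall c (by simp))
    by_cases h2 : (PySem.Chars.isIn [c] "IXCM".toList &&
        ((r.drop 2).take 1 = (r.drop 1).take 1 ∧ (r.drop 1).take 1 = r.take 1 ∧ r.take 1 = [c] : Bool)) = true
    · rw [show pvRomanLoop (c :: rest) ((r.drop 2).take 1) ((r.drop 1).take 1) (r.take 1) = false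
          from by simp only [pvRomanLoop]; rw [if_neg (by exact fun h => h h1), if_pos h2]]
      simp only [Bool.false_eq_true, false_iff]
      rintro ⟨-, hpats⟩
      obtain ⟨pat, hmem, hpre⟩ := (pvChecks_iff c r).mp (Or.inl h2)
      exact hpats pat hmem ((pvEnds_cons pat c rest r).mpr (Or.inl hpre))
    by_cases h3 : (((r.drop 1).take 1 = ['V'] ∧ r.take 1 = ['I'] ∧ c = 'V' : Bool) ||
            ((r.drop 1).take 1 = ['L'] ∧ r.take 1 = ['X'] ∧ c = 'L' : Bool) ||
            ((r.drop 1).take 1 = ['D'] ∧ r.take 1 = ['C'] ∧ c = 'D' : Bool)) = true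
    · rw [show pvRomanLoop (c :: rest) ((r.drop 2).take 1) ((r.drop 1).take 1) (r.take 1) = false
          from by simp only [pvRomanLoop]; rw [if_neg (by exact fun h => h h1), if_neg h2, if_pos h3]]
      simp only [Bool.false_eq_true, false_iff]
      rintro ⟨-, hpats⟩
      obtain ⟨pat, hmem, hpre⟩ := (pvChecks_iff c r).mp (Or.inr h3)
      exact hpats pat hmem ((pvEnds_cons pat c rest r).mpr (Or.inl hpre))
    · rw [show pvRomanLoop (c :: rest) ((r.drop 2).take 1) ((r.drop 1).take 1) (r.take 1) =
            pvRomanLoop rest ((r.drop 1).take 1) (r.take 1) [c]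
          from by simp only [pvRomanLoop]; rw [if_neg (by exact fun h => h h1), if_neg h2, if_neg h3]]
      rw [show ((r.drop 1).take 1) = ((c :: r).drop 2).take 1 from by simp,
          show (r.take 1) = ((c :: r).drop 1).take 1 from by simp,
          show ([c] : List Char) = (c :: r).take 1 from by simp]
      rw [ih (c :: r)]
      have hno : ¬ ∃ pat ∈ pvPats, pat.reverse <+: (c :: r) := by
        intro hex
        rcases (pvChecks_iff c r).mpr hex with h | h
        · exact h2 h
        · exact h3 h
      constructor
      · rintro ⟨hall, hpats⟩
        refine ⟨?_, ?_⟩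
        · intro x hx
          rcases List.mem_cons.mp hx with hx | hx
          · subst hx; exact h1
          · exact hall x hx
        · intro pat hmem
          rw [pvEnds_cons]
          rintro (hpre | hend)
          · exact hno ⟨pat, hmem, hpre⟩
          · exact hpats pat hmem hend
      · rintro ⟨hall, hpats⟩
        refine ⟨fun x hx => hall x (by simp [hx]), ?_⟩
        intro pat hmem hend
        exact hpats pat hmem ((pvEnds_cons pat c rest r).mpr (Or.inr hend))

theorem pvAlt_iff (s : String) :
    is_valid_roman_number_alt s = true ↔
      (∀ c ∈ s.toList, PySem.Chars.isIn [c] "IVXLCDM".toList = true) ∧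
      (∀ pat ∈ pvPats, ¬ pat <:+: s.toList) := by
  have hw := pvRomanLoop_spec s.toList []
  simp only [List.drop_nil, List.take_nil] at hw
  unfold is_valid_roman_number_alt
  rw [hw]
  refine and_congr_right fun _ => ?_
  refine forall_congr' fun pat => forall_congr' fun hmem => not_congr ?_
  have hne : pat ≠ [] := by fin_cases hmem <;> simp
  exact pvEnds_nil_right pat s.toList hne

theorem pvA_iff (s : String) :
    is_valid_roman_number s = true ↔
      (∀ c ∈ s.toList, PySem.Chars.isIn [c] "IVXLCDM".toList = true) ∧
      (∀ pat ∈ pvPats, ¬ pat <:+: s.toList) := by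
  unfold is_valid_roman_number
  by_cases h1 : (List.all (PySem.Set.ofList s.toList)
      fun char => PySem.Chars.isIn [char] "IVXLCDM".toList) = true
  swap
  · rw [if_pos h1]
    simp only [Bool.false_eq_true, false_iff]
    rintro ⟨hall, -⟩
    exact h1 (by
      rw [List.all_eq_true]
      intro c hc
      exact hall c ((PySem.Set.mem_ofList _ _).mp hc))
  rw [if_neg (not_not_intro h1)]
  by_cases h2 : (PySem.Str.isIn "IIII" s || PySem.Str.isIn "XXXX" s ||
      PySem.Str.isIn "CCCC" s || PySem.Str.isIn "MMMM" s) = true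
  · rw [if_pos h2]
    simp only [Bool.false_eq_true, false_iff]
    rintro ⟨-, hpats⟩
    simp only [Bool.or_eq_true, PySem.Str.isIn_iff_infix] at h2
    rcases h2 with ((h | h) | h) | h
    · exact hpats ['I','I','I','I'] (by simp [pvPats]) h
    · exact hpats ['X','X','X','X'] (by simp [pvPats]) h
    · exact hpats ['C','C','C','C'] (by simp [pvPats]) h
    · exact hpats ['M','M','M','M'] (by simp [pvPats]) h
  rw [if_neg h2]
  by_cases h3 : (PySem.Str.isIn "VIV" s || PySem.Str.isIn "LXL" s ||
      PySem.Str.isIn "DCD" s) = true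
  · rw [if_pos h3]
    simp only [Bool.false_eq_true, false_iff]
    rintro ⟨-, hpats⟩
    simp only [Bool.or_eq_true, PySem.Str.isIn_iff_infix] at h3
    rcases h3 with (h | h) | h
    · exact hpats ['V','I','V'] (by simp [pvPats]) h
    · exact hpats ['L','X','L'] (by simp [pvPats]) h
    · exact hpats ['D','C','D'] (by simp [pvPats]) h
  rw [if_neg h3]
  simp only [true_iff]
  rw [List.all_eq_true] at h1
  simp only [Bool.or_eq_true, not_or, PySem.Str.isIn_iff_infix] at h2 h3
  refine ⟨fun c hc => h1 c ((PySem.Set.mem_ofList _ _).mpr hc), ?_⟩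
  intro pat hmem
  fin_cases hmem
  · exact fun h => h2.1.1.1 (by simpa using h)
  · exact fun h => h2.1.1.2 (by simpa using h)
  · exact fun h => h2.1.2 (by simpa using h)
  · exact fun h => h2.2 (by simpa using h)
  · exact fun h => h3.1.1 (by simpa using h)
  · exact fun h => h3.1.2 (by simpa using h)
  · exact fun h => h3.2 (by simpa using h)

theorem is_valid_roman_number_spec : Claim_equal_is_valid_roman_number := by
  intro s _
  unfold Spec_is_valid_roman_number
  rw [Bool.eq_iff_iff, pvA_iff, pvAlt_iff]
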